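-- pv_equiv track=rewrite | github.com/aderumier/emulationstation_gamemanager | screenscraper_service.py | select_best_media_by_region
-- ===== SOURCE A (Python) =====
-- from typing import Dict, List, Optional, Tuple
--
-- def select_best_media_by_region(media_list: List[Dict], region_priority: List[str]) -> Optional[Dict]:
--     """Select the best media from a list based on region priority"""
--     if not media_list:
--         return None
--
--     if len(media_list) == 1:
--         return media_list[0]
--
--     # Try to find media by region priority
--     for region in region_priority:
--         for media in media_list:
--             media_region = media.get('region', '').lower()
--             # Map English region names to ScreenScraper region codes
--             region_mapping = {
--                 'world': 'wor',
--                 'usa': 'us',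
--                 'europe': 'eu',
--                 'japan': 'jp',
--                 'france': 'fr',
--                 'germany': 'de',
--                 'united kingdom': 'uk',
--                 'italy': 'it',
--                 'spain': 'sp',
--                 'netherlands': 'nl',
--                 'denmark': 'dk',
--                 'finland': 'fi',
--                 'sweden': 'se',
--                 'norway': 'no',
--                 'poland': 'pl',
--                 'portugal': 'pt',
--                 'czech republic': 'cz',
--                 'hungary': 'hu',
--                 'greece': 'gr',
--                 'bulgaria': 'bg',
--                 'slovakia': 'sk',
--                 'china': 'cn',
--                 'korea': 'kr',
--                 'taiwan': 'tw',
--                 'asia': 'asi',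
--                 'canada': 'ca',
--                 'brazil': 'br',
--                 'mexico': 'mex',
--                 'chile': 'cl',
--                 'peru': 'pe',
--                 'american continent': 'ame',
--                 'australia': 'au',
--                 'new zealand': 'nz',
--                 'oceania': 'oce',
--                 'israel': 'il',
--                 'united arab emirates': 'ae',
--                 'kuwait': 'kw',
--                 'turkey': 'tr',
--                 'middle east': 'mor',
--                 'south africa': 'za',
--                 'african continent': 'afr',
--                 'russia': 'ru',
--                 'custom': 'cus',
--                 'screenscraper': 'ss'
--             }
--             expected_region_code = region_mapping.get(region.lower(), region.lower())
--             if media_region == expected_region_code: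
--                 return media
--
--     # If no region match found, return the first media
--     return media_list[0]
-- ===== SOURCE B (Python) =====
-- # B: build a region-code -> priority-rank dict once (smallest index wins), then one
-- # best-so-far pass over media_list with strict '<' so the earliest media wins ties;
-- # the name->code table is hoisted and parsed once from compact "name:code" entries.
--
-- _REGION_TABLE = [
--     "world:wor", "usa:us", "europe:eu", "japan:jp", "france:fr", "germany:de",
--     "united kingdom:uk", "italy:it", "spain:sp", "netherlands:nl", "denmark:dk",
--     "finland:fi", "sweden:se", "norway:no", "poland:pl", "portugal:pt",
--     "czech republic:cz", "hungary:hu", "greece:gr", "bulgaria:bg", "slovakia:sk",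
--     "china:cn", "korea:kr", "taiwan:tw", "asia:asi", "canada:ca", "brazil:br",
--     "mexico:mex", "chile:cl", "peru:pe", "american continent:ame",
--     "australia:au", "new zealand:nz", "oceania:oce", "israel:il",
--     "united arab emirates:ae", "kuwait:kw", "turkey:tr", "middle east:mor",
--     "south africa:za", "african continent:afr", "russia:ru", "custom:cus",
--     "screenscraper:ss",
-- ]
-- _REGION_MAPPING = dict(entry.split(':') for entry in _REGION_TABLE)
--
--
-- def select_best_media_by_region(media_list, region_priority):
--     """Select the best media from a list based on region priority"""
--     if not media_list:
--         return None
--     if len(media_list) == 1: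
--         return media_list[0]
--
--     ranks = {}
--     for i, region in enumerate(region_priority):
--         code = _REGION_MAPPING.get(region.lower(), region.lower())
--         if code not in ranks:
--             ranks[code] = i
--
--     inf = len(region_priority)
--     best = media_list[0]
--     best_rank = ranks.get(best.get('region', '').lower(), inf)
--     for media in media_list[1:]:
--         r = ranks.get(media.get('region', '').lower(), inf)
--         if r < best_rank:
--             best, best_rank = media, r
--     return best
-- ===== Notes on version B (the rewrite author's own statement) =====
-- stated objective: faster
-- what changed: Replaces A's nested region-then-media loops (which rebuild the 44-entry mapping dict inside the inner loop) with a code-to-priority-rank dict built once from region_priority followed by a single best-so-far pass over media_list using strict '<' so the earliest media wins ties; the name-to-code table is hoisted and parsed once from compact name:code entries.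
import Mathlib
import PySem

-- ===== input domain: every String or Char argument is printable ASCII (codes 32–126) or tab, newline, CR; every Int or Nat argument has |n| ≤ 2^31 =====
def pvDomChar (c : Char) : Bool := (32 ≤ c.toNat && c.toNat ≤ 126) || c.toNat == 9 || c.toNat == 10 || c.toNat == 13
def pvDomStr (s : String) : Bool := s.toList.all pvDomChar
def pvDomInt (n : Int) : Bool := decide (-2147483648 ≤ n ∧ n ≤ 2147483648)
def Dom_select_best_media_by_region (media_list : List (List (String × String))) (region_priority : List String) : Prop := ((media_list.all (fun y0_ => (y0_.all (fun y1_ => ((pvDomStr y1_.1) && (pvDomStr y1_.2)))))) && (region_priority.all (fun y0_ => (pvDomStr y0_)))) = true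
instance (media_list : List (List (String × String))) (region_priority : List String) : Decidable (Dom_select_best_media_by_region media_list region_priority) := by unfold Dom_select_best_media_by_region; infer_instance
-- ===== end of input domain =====

-- B replaces A's nested region-then-media loops (which rebuild the 44-entry mapping
-- dict on every inner step) by a code→priority-rank dict built once from region_priority
-- plus ONE best-so-far pass over media_list with strict '<' (objective: alternative).

-- ===== PORT A =====

-- the region_mapping dict literal A rebuilds inside the loop body (a named value here;
-- it is the same dict on every iteration)
def pvRegionMappingA : PySem.Dict String String :=
  PySem.Dict.ofList
  [("world", "wor"), ("usa", "us"), ("europe", "eu"), ("japan", "jp"),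
   ("france", "fr"), ("germany", "de"), ("united kingdom", "uk"), ("italy", "it"),
   ("spain", "sp"), ("netherlands", "nl"), ("denmark", "dk"), ("finland", "fi"),
   ("sweden", "se"), ("norway", "no"), ("poland", "pl"), ("portugal", "pt"),
   ("czech republic", "cz"), ("hungary", "hu"), ("greece", "gr"), ("bulgaria", "bg"),
   ("slovakia", "sk"), ("china", "cn"), ("korea", "kr"), ("taiwan", "tw"),
   ("asia", "asi"), ("canada", "ca"), ("brazil", "br"), ("mexico", "mex"),
   ("chile", "cl"), ("peru", "pe"), ("american continent", "ame"),
   ("australia", "au"), ("new zealand", "nz"), ("oceania", "oce"),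
   ("israel", "il"), ("united arab emirates", "ae"), ("kuwait", "kw"),
   ("turkey", "tr"), ("middle east", "mor"), ("south africa", "za"),
   ("african continent", "afr"), ("russia", "ru"), ("custom", "cus"),
   ("screenscraper", "ss")]

-- A's inner loop: 'for media in media_list: … if media_region == expected: return media'
def pvFindMediaA (region : String) : List (List (String × String)) → Option (List (String × String))
  | [] => none
  | media :: rest =>
    let media_region := PySem.Str.lower (PySem.Dict.getD ⟨media⟩ "region" "")
    let region_mapping : PySem.Dict String String := pvRegionMappingA
    let expected_region_code :=
      PySem.Dict.getD region_mapping (PySem.Str.lower region) (PySem.Str.lower region)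
    if media_region == expected_region_code then some media else pvFindMediaA region rest

-- A's outer loop: 'for region in region_priority: …'
def pvLoopRegionsA (media_list : List (List (String × String))) : List String → Option (List (String × String))
  | [] => none
  | region :: rest =>
    match pvFindMediaA region media_list with
    | some media => some media
    | none => pvLoopRegionsA media_list rest

def select_best_media_by_region (media_list : List (List (String × String))) (region_priority : List String) : Option (List (String × String)) :=
  match media_list with
  | [] => none
  | [m] => some m
  | m :: _ :: _ =>
    match pvLoopRegionsA media_list region_priority with
    | some media => some media
    | none => some m

-- ===== PORT B =====

-- B's hoisted name→code table, "name:code" entries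
def pvRegionEntriesB : List String :=
  ["world:wor", "usa:us", "europe:eu", "japan:jp", "france:fr", "germany:de",
   "united kingdom:uk", "italy:it", "spain:sp", "netherlands:nl", "denmark:dk",
   "finland:fi", "sweden:se", "norway:no", "poland:pl", "portugal:pt",
   "czech republic:cz", "hungary:hu", "greece:gr", "bulgaria:bg", "slovakia:sk",
   "china:cn", "korea:kr", "taiwan:tw", "asia:asi", "canada:ca", "brazil:br",
   "mexico:mex", "chile:cl", "peru:pe", "american continent:ame",
   "australia:au", "new zealand:nz", "oceania:oce", "israel:il",
   "united arab emirates:ae", "kuwait:kw", "turkey:tr", "middle east:mor",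
   "south africa:za", "african continent:afr", "russia:ru", "custom:cus",
   "screenscraper:ss"]

-- dict(entry.split(':') for entry in _REGION_TABLE); every entry contains exactly
-- one ':' (split? is exact here: the separator is nonempty, so it never returns none,
-- and each split has exactly two pieces — the fallback branches are unreachable)
def pvRegionMappingB : PySem.Dict String String :=
  PySem.Dict.ofList (pvRegionEntriesB.map (fun entry =>
    match PySem.Str.split? entry ":" with
    | some (k :: v :: _) => (k, v)
    | _ => (entry, entry)))

-- 'ranks = {}; for i, region in enumerate(region_priority): … if code not in ranks: ranks[code] = i'
def pvRanksB (region_priority : List String) : PySem.Dict String Int :=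
  (PySem.List.enumerate region_priority).foldl (fun ranks p =>
    let code := PySem.Dict.getD pvRegionMappingB (PySem.Str.lower p.2) (PySem.Str.lower p.2)
    if PySem.Dict.contains ranks code then ranks else PySem.Dict.insert ranks code p.1)
    PySem.Dict.empty

def select_best_media_by_region_alt (media_list : List (List (String × String))) (region_priority : List String) : Option (List (String × String)) :=
  match media_list with
  | [] => none
  | [m] => some m
  | m0 :: m1 :: t =>
    let ranks := pvRanksB region_priority
    let inf : Int := region_priority.length
    let best_rank := PySem.Dict.getD ranks (PySem.Str.lower (PySem.Dict.getD ⟨m0⟩ "region" "")) inf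
    let res := (m1 :: t).foldl (fun st media =>
        let r := PySem.Dict.getD ranks (PySem.Str.lower (PySem.Dict.getD ⟨media⟩ "region" "")) inf
        if r < st.2 then (media, r) else st) (m0, best_rank)
    some res.1

-- ===== PRECONDITION & SPEC =====
def Spec_select_best_media_by_region (media_list : List (List (String × String))) (region_priority : List String) (out : Option (List (String × String))) : Prop := out = select_best_media_by_region_alt media_list region_priority
instance (media_list : List (List (String × String))) (region_priority : List String) (out : Option (List (String × String))) : Decidable (Spec_select_best_media_by_region media_list region_priority out) := by unfold Spec_select_best_media_by_region; infer_instance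

-- ===== CLAIM =====
def Claim_equal_select_best_media_by_region : Prop := ∀ (media_list : List (List (String × String))) (region_priority : List String), Dom_select_best_media_by_region media_list region_priority → Spec_select_best_media_by_region media_list region_priority (select_best_media_by_region media_list region_priority)

-- ===== LEMMAS AND PROOFS =====

-- proof-only abbreviations
def pvMr (media : List (String × String)) : String :=
  PySem.Str.lower (PySem.Dict.getD ⟨media⟩ "region" "")

def pvCode (r : String) : String :=
  PySem.Dict.getD pvRegionMappingA (PySem.Str.lower r) (PySem.Str.lower r)

def pvCodeB (r : String) : String :=
  PySem.Dict.getD pvRegionMappingB (PySem.Str.lower r) (PySem.Str.lower r)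

set_option maxRecDepth 100000 in
set_option maxHeartbeats 2000000 in
lemma pvMapB_eq : pvRegionMappingB = pvRegionMappingA := by decide

lemma pvCodeB_eq : pvCodeB = pvCode := by
  funext r; unfold pvCodeB pvCode; rw [pvMapB_eq]

-- rank of a region string against the priority code list, as an Int
def pvRankI (codes : List String) (s : String) : Int :=
  match PySem.List.index? codes s with
  | some i => (i : Int)
  | none => (codes.length : Int)

-- running strict-min step over an optional best
def pvStep (key : List (String × String) → Int)
    (acc : Option (List (String × String))) (x : List (String × String)) :
    Option (List (String × String)) :=
  match acc with
  | none => some x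
  | some m => if key x < key m then some x else some m

-- ---------- A side: first match over the code list ----------

def pvFirstC (media_list : List (List (String × String))) : List String → Option (List (String × String))
  | [] => none
  | c :: cs =>
    match media_list.find? (fun m => pvMr m == c) with
    | some m => some m
    | none => pvFirstC media_list cs

lemma findMediaA_eq (r : String) (ml : List (List (String × String))) :
    pvFindMediaA r ml = ml.find? (fun m => pvMr m == pvCode r) := by
  induction ml with
  | nil => rfl
  | cons m rest ih =>
    show (if pvMr m == pvCode r then some m else pvFindMediaA r rest) = _
    rw [List.find?_cons]
    cases pvMr m == pvCode r
    · simpa using ih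
    · rfl

lemma loopRegionsA_eq (ml : List (List (String × String))) (rp : List String) :
    pvLoopRegionsA ml rp = pvFirstC ml (rp.map pvCode) := by
  induction rp with
  | nil => rfl
  | cons r rs ih =>
    simp only [pvLoopRegionsA, List.map, pvFirstC, findMediaA_eq]
    split <;> simp_all

-- ---------- B side: the ranks dict computes pvRankI ----------

set_option maxRecDepth 100000 in
lemma ranks_fold (rs : List String) (k : Int) (d : PySem.Dict String Int) (s : String) :
    PySem.Dict.get? ((PySem.List.enumerate rs k).foldl (fun ranks p =>
      if PySem.Dict.contains ranks (pvCodeB p.2) then ranks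
      else PySem.Dict.insert ranks (pvCodeB p.2) p.1) d) s =
    (match PySem.Dict.get? d s with
     | some v => some v
     | none => (PySem.List.index? (rs.map pvCodeB) s).map (fun i : Nat => k + i)) := by
  induction rs generalizing k d with
  | nil =>
    rw [PySem.List.enumerate_nil, List.foldl_nil]
    cases h : PySem.Dict.get? d s <;> simp [PySem.List.index?_eq_idxOf?]
  | cons r rs ih =>
    rw [PySem.List.enumerate_cons, List.foldl_cons, ih]
    by_cases hs : s = pvCodeB r
    · subst hs
      by_cases hc : PySem.Dict.contains d (pvCodeB r) = true
      · rw [if_pos hc]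
        have hsome : (PySem.Dict.get? d (pvCodeB r)).isSome := by
          rw [← PySem.Dict.contains_eq_isSome_get?]; exact hc
        obtain ⟨v, hv⟩ := Option.isSome_iff_exists.mp hsome
        simp [hv]
      · rw [if_neg hc]
        have hnone : PySem.Dict.get? d (pvCodeB r) = none := by
          cases h : PySem.Dict.get? d (pvCodeB r) with
          | none => rfl
          | some v =>
            exact absurd (by rw [PySem.Dict.contains_eq_isSome_get?, h]; rfl) hc
        rw [PySem.Dict.get?_insert_self, hnone, List.map_cons, PySem.List.index?_cons_self]
        simp
    · have hd' : PySem.Dict.get?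
          (if PySem.Dict.contains d (pvCodeB r) then d
           else PySem.Dict.insert d (pvCodeB r) k) s = PySem.Dict.get? d s := by
        split
        · rfl
        · rw [PySem.Dict.get?_insert]
          rw [if_neg hs]
      rw [hd', List.map_cons, PySem.List.index?_cons_of_ne _ (fun he => hs he.symm)]
      cases PySem.Dict.get? d s <;>
        cases PySem.List.index? (rs.map pvCodeB) s <;>
          (simp; try omega)

lemma ranks_getD (rp : List String) (s : String) :
    PySem.Dict.getD (pvRanksB rp) s ((rp.length : Int)) = pvRankI (rp.map pvCodeB) s := by
  have h := ranks_fold rp 0 PySem.Dict.empty s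
  rw [PySem.Dict.get?_empty] at h
  have h' : PySem.Dict.get? (pvRanksB rp) s
      = (PySem.List.index? (rp.map pvCodeB) s).map (fun i : Nat => (0 : Int) + i) := h
  rw [PySem.Dict.getD_eq_get?_getD, h']
  unfold pvRankI
  cases hx : PySem.List.index? (rp.map pvCodeB) s <;> simp

-- ---------- the B fold with a pair accumulator is the pvStep fold ----------

lemma pairfold_eq (key : List (String × String) → Int) :
    ∀ (t : List (List (String × String))) (st : List (String × String) × Int),
      st.2 = key st.1 →
      some (t.foldl (fun st media => if key media < st.2 then (media, key media) else st) st).1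
        = t.foldl (pvStep key) (some st.1) := by
  intro t
  induction t with
  | nil => intro st _; rfl
  | cons a t ih =>
    intro st hst
    rw [List.foldl_cons, List.foldl_cons]
    by_cases h : key a < st.2
    · rw [if_pos h]
      have hstep : pvStep key (some st.1) a = some a := by
        simp only [pvStep]; rw [if_pos (hst ▸ h)]
      rw [hstep]
      exact ih (a, key a) rfl
    · rw [if_neg h]
      have hstep : pvStep key (some st.1) a = some st.1 := by
        simp only [pvStep]; rw [if_neg (hst ▸ h)]
      rw [hstep]
      exact ih st hst

-- ---------- rank facts ----------

lemma rank_nil (s : String) : pvRankI [] s = 0 := rfl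

lemma rank_cons_self (c : String) (cs : List String) (s : String)
    (h : s = c) : pvRankI (c :: cs) s = 0 := by
  subst h; simp only [pvRankI]; rw [PySem.List.index?_cons_self]; simp

lemma rank_cons_ne (c : String) (cs : List String) (s : String)
    (h : s ≠ c) : pvRankI (c :: cs) s = pvRankI cs s + 1 := by
  simp only [pvRankI]
  rw [PySem.List.index?_cons_of_ne cs (fun he => h he.symm)]
  cases PySem.List.index? cs s <;> simp

lemma rank_nonneg (codes : List String) (s : String) : 0 ≤ pvRankI codes s := by
  unfold pvRankI
  cases PySem.List.index? codes s <;> simp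

-- ---------- running-min facts over Int keys ----------

lemma foldl_step_keep (key : List (String × String) → Int)
    (t : List (List (String × String))) (m : List (String × String))
    (h : ∀ x ∈ t, ¬ key x < key m) :
    t.foldl (pvStep key) (some m) = some m := by
  induction t with
  | nil => rfl
  | cons a t ih =>
    simp only [List.foldl, pvStep]
    rw [if_neg (h a (by simp))]
    exact ih (fun x hx => h x (by simp [hx]))

lemma foldl_step_first_zero (key : List (String × String) → Int) :
    ∀ (t : List (List (String × String))) (m : List (String × String))
      (acc : Option (List (String × String))),
      t.find? (fun x => key x == 0) = some m →
      (∀ x ∈ t, 0 ≤ key x) →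
      (∀ b, acc = some b → 0 < key b) →
      t.foldl (pvStep key) acc = some m
  | [], m, acc, h, _, _ => by simp at h
  | a :: t, m, acc, h, hnn, hacc => by
    by_cases ha : key a = 0
    · have hm : m = a := by
        rw [List.find?_cons_of_pos (by simp [ha])] at h
        exact (Option.some.inj h).symm
      subst hm
      have hstep : pvStep key acc m = some m := by
        cases acc with
        | none => rfl
        | some b => simp [pvStep, ha, hacc b rfl]
      rw [List.foldl_cons, hstep]
      exact foldl_step_keep key t m (fun x hx => by
        have := hnn x (by simp [hx]); omega)
    · have hfind : t.find? (fun x => key x == 0) = some m := by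
        rw [List.find?_cons_of_neg (by simp [ha])] at h
        exact h
      have hnn' : ∀ x ∈ t, 0 ≤ key x := fun x hx => hnn x (by simp [hx])
      have h0a : 0 < key a := by have := hnn a (by simp); omega
      have hacc' : ∀ b, pvStep key acc a = some b → 0 < key b := by
        intro b hb
        cases acc with
        | none =>
          simp only [pvStep] at hb
          cases hb
          exact h0a
        | some b0 =>
          have hb0 := hacc b0 rfl
          simp only [pvStep] at hb
          split at hb <;> cases hb
          · exact h0a
          · exact hb0
      rw [List.foldl_cons]
      exact foldl_step_first_zero key t m _ hfind hnn' hacc'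

lemma foldl_step_shift (key1 key2 : List (String × String) → Int) :
    ∀ (t : List (List (String × String))) (acc : Option (List (String × String))),
      (∀ x ∈ t, key1 x = key2 x + 1) →
      (∀ b, acc = some b → key1 b = key2 b + 1) →
      t.foldl (pvStep key1) acc = t.foldl (pvStep key2) acc := by
  intro t
  induction t with
  | nil => intros; rfl
  | cons a t ih =>
    intro acc ht hacc
    have ha := ht a (by simp)
    have hstep : pvStep key1 acc a = pvStep key2 acc a := by
      cases acc with
      | none => rfl
      | some b =>
        have hb := hacc b rfl
        simp only [pvStep]
        by_cases h12 : key1 a < key1 b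
        · rw [if_pos h12, if_pos (by omega)]
        · rw [if_neg h12, if_neg (by omega)]
    have hacc' : ∀ y, pvStep key2 acc a = some y → key1 y = key2 y + 1 := by
      intro y hy
      cases acc with
      | none =>
        simp only [pvStep] at hy
        cases hy; exact ha
      | some b2 =>
        simp only [pvStep] at hy
        split at hy
        · cases hy; exact ha
        · cases hy; exact hacc _ rfl
    simp only [List.foldl, hstep]
    exact ih _ (fun x hx => ht x (by simp [hx])) hacc'

-- main bridge: A's first-match-by-code search equals B's strict running-min by rank
lemma main_bridge : ∀ (codes : List String) (m0 : List (String × String))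
    (t : List (List (String × String))),
    (match pvFirstC (m0 :: t) codes with
     | some x => some x
     | none => some m0) = (m0 :: t).foldl (pvStep (fun m => pvRankI codes (pvMr m))) none := by
  intro codes
  induction codes with
  | nil =>
    intro m0 t
    simp only [pvFirstC, List.foldl, pvStep]
    rw [foldl_step_keep _ t m0 (fun x _ => by rw [rank_nil, rank_nil]; omega)]
  | cons c cs ih =>
    intro m0 t
    have hpred : (fun (m : List (String × String)) => pvMr m == c)
        = (fun x => pvRankI (c :: cs) (pvMr x) == 0) := by
      funext x
      by_cases h : pvMr x = c
      · simp [h, rank_cons_self c cs _ rfl]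
      · have h1 := rank_cons_ne c cs (pvMr x) h
        have h2 := rank_nonneg cs (pvMr x)
        simp [h]
        omega
    cases hf : (m0 :: t).find? (fun m => pvMr m == c) with
    | some m =>
      simp only [pvFirstC, hf]
      have hfind : (m0 :: t).find? (fun x => pvRankI (c :: cs) (pvMr x) == 0) = some m := by
        rw [← hpred]; exact hf
      exact (foldl_step_first_zero _ (m0 :: t) m none hfind
        (fun x _ => rank_nonneg _ _) (by intro b hb; cases hb)).symm
    | none =>
      have hnone : ∀ x ∈ m0 :: t, pvMr x ≠ c := by
        intro x hx
        have := List.find?_eq_none.mp hf x hx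
        simpa using this
      have hshift : ∀ x ∈ m0 :: t,
          pvRankI (c :: cs) (pvMr x) = pvRankI cs (pvMr x) + 1 :=
        fun x hx => rank_cons_ne c cs (pvMr x) (hnone x hx)
      simp only [pvFirstC, hf]
      rw [ih m0 t]
      exact (foldl_step_shift _ _ (m0 :: t) none hshift
        (by intro b hb; cases hb)).symm

-- ===== VERDICT (by name: the statement is the Claim_ definition above) =====
theorem select_best_media_by_region_spec : Claim_equal_select_best_media_by_region := by
  intro media_list region_priority _
  unfold Spec_select_best_media_by_region
  match media_list with
  | [] => rfl
  | [m] => rfl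
  | m0 :: m1 :: t =>
    have hfun : (fun (st : List (String × String) × Int) media =>
          if PySem.Dict.getD (pvRanksB region_priority)
              (PySem.Str.lower (PySem.Dict.getD ⟨media⟩ "region" "")) ((region_priority.length : Int)) < st.2
          then (media, PySem.Dict.getD (pvRanksB region_priority)
              (PySem.Str.lower (PySem.Dict.getD ⟨media⟩ "region" "")) ((region_priority.length : Int)))
          else st)
        = (fun st media =>
            if pvRankI (region_priority.map pvCodeB) (pvMr media) < st.2
            then (media, pvRankI (region_priority.map pvCodeB) (pvMr media)) else st) := by
      funext st media
      rw [ranks_getD]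
      rfl
    have hB : select_best_media_by_region_alt (m0 :: m1 :: t) region_priority
        = (m0 :: m1 :: t).foldl
            (pvStep (fun m => pvRankI (region_priority.map pvCodeB) (pvMr m))) none := by
      show some ((m1 :: t).foldl (fun st media =>
          if PySem.Dict.getD (pvRanksB region_priority)
              (PySem.Str.lower (PySem.Dict.getD ⟨media⟩ "region" "")) ((region_priority.length : Int)) < st.2
          then (media, PySem.Dict.getD (pvRanksB region_priority)
              (PySem.Str.lower (PySem.Dict.getD ⟨media⟩ "region" "")) ((region_priority.length : Int)))
          else st)
          (m0, PySem.Dict.getD (pvRanksB region_priority)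
              (PySem.Str.lower (PySem.Dict.getD ⟨m0⟩ "region" "")) ((region_priority.length : Int)))).1 = _
      rw [hfun]
      rw [pairfold_eq (fun m => pvRankI (region_priority.map pvCodeB) (pvMr m)) (m1 :: t)
          (m0, PySem.Dict.getD (pvRanksB region_priority)
              (PySem.Str.lower (PySem.Dict.getD ⟨m0⟩ "region" "")) ((region_priority.length : Int)))
          (ranks_getD region_priority (pvMr m0))]
      rfl
    show (match pvLoopRegionsA (m0 :: m1 :: t) region_priority with
          | some media => some media
          | none => some m0) = _
    rw [hB, loopRegionsA_eq, pvCodeB_eq]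
    exact main_bridge (region_priority.map pvCode) m0 (m1 :: t)
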